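-- pv_equiv track=rewrite | github.com/microsoft/promptbase | guidance_programs/fewshot_cot_as_conversation_ensemble.py | apply_swaps
-- ===== SOURCE A (Python) =====
-- from typing import Any, Dict, Iterator, TypeVar
--
-- def validate_and_sort_swaps(swaps: list[int], line_len: int) -> list[int]:
--     swap_set = set(swaps)
--     assert len(swap_set) == len(swaps), f"Swaps not unique: {swaps}"
--     for s in swaps:
--         assert s - 1 not in swap_set, f"Swaps too close: {s} {swaps}"
--         assert s + 1 not in swap_set, f"Swaps too close: {s} {swaps}"
--         assert s >= 0, f"Negative swap: {s}"
--         assert s < (line_len - 1), f"Swap too large: {s}"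
--     return list(sorted(swaps))
--
-- T = TypeVar("T")
--
-- def apply_swaps(line: list[T], swaps: list[int]) -> list[T]:
--     sorted_swaps = validate_and_sort_swaps(swaps, len(line))
--
--     i_swap = 0
--     result = []
--     for i in range(len(line)):
--         if i_swap < len(sorted_swaps) and i == sorted_swaps[i_swap]:
--             result.append(line[sorted_swaps[i_swap] + 1])
--         elif i_swap < len(sorted_swaps) and i == sorted_swaps[i_swap] + 1:
--             result.append(line[sorted_swaps[i_swap]])
--             i_swap += 1
--         else:
--             result.append(line[i])
--     return result
-- ===== SOURCE B (Python) =====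
-- def validate_and_sort_swaps(swaps, line_len):
--     swap_set = set(swaps)
--     assert len(swap_set) == len(swaps), f"Swaps not unique: {swaps}"
--     for s in swaps:
--         assert s - 1 not in swap_set, f"Swaps too close: {s} {swaps}"
--         assert s + 1 not in swap_set, f"Swaps too close: {s} {swaps}"
--         assert s >= 0, f"Negative swap: {s}"
--         assert s < (line_len - 1), f"Swap too large: {s}"
--     return list(sorted(swaps))
--
--
-- def apply_swaps(line, swaps):
--     result = list(line)
--     for s in validate_and_sort_swaps(swaps, len(line)):
--         result[s], result[s + 1] = result[s + 1], result[s]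
--     return result
-- ===== Notes on version B (the rewrite author's own statement) =====
-- stated objective: simpler
-- what changed: B copies the line once and performs each validated adjacent swap in place while looping over the k sorted swap indices, instead of A's single n-length pass that rebuilds the list index by index with an i_swap pointer and index-matching branches.
import Mathlib
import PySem

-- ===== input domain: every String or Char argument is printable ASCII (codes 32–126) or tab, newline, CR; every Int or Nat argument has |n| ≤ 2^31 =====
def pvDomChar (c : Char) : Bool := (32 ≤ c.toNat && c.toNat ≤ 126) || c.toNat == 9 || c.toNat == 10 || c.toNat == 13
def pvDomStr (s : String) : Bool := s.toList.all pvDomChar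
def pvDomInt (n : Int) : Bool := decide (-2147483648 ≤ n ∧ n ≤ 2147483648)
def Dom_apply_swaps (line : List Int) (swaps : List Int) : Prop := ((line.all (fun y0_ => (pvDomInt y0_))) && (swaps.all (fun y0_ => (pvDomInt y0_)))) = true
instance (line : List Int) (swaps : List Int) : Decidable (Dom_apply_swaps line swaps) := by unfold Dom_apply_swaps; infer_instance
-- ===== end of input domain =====

-- B copies the line once and performs each validated adjacent swap in place over the sorted
-- swap indices, instead of A's index-by-index rebuild with an i_swap pointer; neither program
-- mutates its arguments.

-- ===== PORT A =====
-- one loop step of A's `for i in range(len(line))` (state = (i_swap, result))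
def stepA (ss line : List Int) (st : Nat × List Int) (i : Nat) : Nat × List Int :=
  if st.1 < ss.length ∧ (i : Int) = PySem.List.pyGetD ss (st.1 : Int) 0 then
    (st.1, st.2 ++ [PySem.List.pyGetD line (PySem.List.pyGetD ss (st.1 : Int) 0 + 1) 0])
  else if st.1 < ss.length ∧ (i : Int) = PySem.List.pyGetD ss (st.1 : Int) 0 + 1 then
    (st.1 + 1, st.2 ++ [PySem.List.pyGetD line (PySem.List.pyGetD ss (st.1 : Int) 0) 0])
  else
    (st.1, st.2 ++ [PySem.List.pyGetD line (i : Int) 0])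

def apply_swaps (line : List Int) (swaps : List Int) : List Int :=
  let sorted_swaps := PySem.List.sorted swaps (fun x => x) false
  ((List.range line.length).foldl (stepA sorted_swaps line) (0, ([] : List Int))).2

-- ===== PORT B =====
-- one loop step of B's `for s in ...`: result[s], result[s+1] = result[s+1], result[s]
def stepB (result : List Int) (s : Int) : List Int :=
  let a := PySem.List.pyGetD result s 0
  let b := PySem.List.pyGetD result (s + 1) 0
  PySem.List.pySetD (PySem.List.pySetD result s b) (s + 1) a

def apply_swaps_alt (line : List Int) (swaps : List Int) : List Int :=
  (PySem.List.sorted swaps (fun x => x) false).foldl stepB line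

-- ===== PRECONDITION & SPEC =====
-- Pre_ excludes exactly the inputs on which A's validate_and_sort_swaps raises AssertionError
-- (duplicate, adjacent, negative or too-large swap indices); B raises there too.
def Pre_apply_swaps (line : List Int) (swaps : List Int) : Prop :=
  swaps.Nodup ∧ ∀ s ∈ swaps, (s - 1) ∉ swaps ∧ (s + 1) ∉ swaps ∧ 0 ≤ s ∧ s < (line.length : Int) - 1
instance (line : List Int) (swaps : List Int) : Decidable (Pre_apply_swaps line swaps) := by
  unfold Pre_apply_swaps; infer_instance

def pvWitness_apply_swaps : List Int × List Int := ([3, 1, 4, 1, 5], [0, 2])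

def Spec_apply_swaps (line : List Int) (swaps : List Int) (out : List Int) : Prop := out = apply_swaps_alt line swaps
instance (line : List Int) (swaps : List Int) (out : List Int) : Decidable (Spec_apply_swaps line swaps out) := by unfold Spec_apply_swaps; infer_instance

-- ===== CLAIM (what is proved, stated in full; the proofs are below) =====
def Claim_equal_apply_swaps : Prop := ∀ (line : List Int) (swaps : List Int), Dom_apply_swaps line swaps → Pre_apply_swaps line swaps → Spec_apply_swaps line swaps (apply_swaps line swaps)

-- ===== LEMMAS AND PROOFS =====

-- the common target: entry i of the swapped line, in terms of the ORIGINAL line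
def tgt (line ss : List Int) (i : Nat) : Int :=
  if (i : Int) ∈ ss then line.getD (i + 1) 0
  else if ((i : Int) - 1) ∈ ss then line.getD (i - 1) 0
  else line.getD i 0

-- the sorted swap list is strictly increasing with gaps ≥ 2 ...
def Gapped (ss : List Int) : Prop := ss.Pairwise (fun a b => a + 2 ≤ b)

-- ... and every swap index s satisfies 0 ≤ s and s + 1 < len(line)
def Bounded (ss : List Int) (n : Nat) : Prop := ∀ s ∈ ss, 0 ≤ s ∧ s + 1 < (n : Int)

lemma stepB_eq (line : List Int) (sn : Nat) :
    stepB line (sn : Int)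
      = (line.set sn (line.getD (sn + 1) 0)).set (sn + 1) (line.getD sn 0) := by
  unfold stepB
  have hc : ((sn : Int) + 1) = ((sn + 1 : Nat) : Int) := by push_cast; ring
  rw [hc]
  simp only [PySem.List.pySetD_natCast, PySem.List.pyGetD_natCast, List.getD_eq_getElem?_getD]

lemma getD_swap (line : List Int) (sn : Nat) (a b : Int) (h : sn + 1 < line.length) (j : Nat) :
    ((line.set sn b).set (sn + 1) a).getD j 0
      = if j = sn + 1 then a else if j = sn then b else line.getD j 0 := by
  simp only [List.getD_eq_getElem?_getD, List.getElem?_set, List.length_set]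
  split_ifs <;> first | rfl | omega

lemma tgt_swap (line : List Int) (sn : Nat) (rest : List Int)
    (h1 : sn + 1 < line.length)
    (hrest : ∀ r ∈ rest, (sn : Int) + 2 ≤ r)
    (i : Nat) :
    tgt (stepB line (sn : Int)) rest i = tgt line ((sn : Int) :: rest) i := by
  rw [stepB_eq]
  unfold tgt
  by_cases h0 : i = sn
  · have hne : ((i : Int)) ∉ rest := fun h => by have := hrest _ h; omega
    have hnem : ((i : Int) - 1) ∉ rest := fun h => by have := hrest _ h; omega
    have hc : ((i : Int)) = (sn : Int) := by omega
    rw [if_neg hne, if_neg hnem, if_pos (hc ▸ List.mem_cons_self), getD_swap _ _ _ _ h1,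
      if_neg (by omega), if_pos h0, h0]
  · by_cases h0' : i = sn + 1
    · have e1 : ((i : Int)) ∉ rest := fun h => by have := hrest _ h; omega
      have e2 : ((i : Int) - 1) ∉ rest := fun h => by have := hrest _ h; omega
      have e1' : ((i : Int)) ∉ ((sn : Int) :: rest) := by
        intro h
        rcases List.mem_cons.mp h with h | h
        · omega
        · exact e1 h
      have hc : ((i : Int) - 1) = (sn : Int) := by omega
      rw [if_neg e1, if_neg e2, if_neg e1', if_pos (hc ▸ List.mem_cons_self),
        getD_swap _ _ _ _ h1, if_pos h0', show i - 1 = sn from by omega]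
    · have m1 : ((i : Int) ∈ ((sn : Int) :: rest)) ↔ (i : Int) ∈ rest := by
        simp only [List.mem_cons, or_iff_right_iff_imp]
        intro h; omega
      have m2 : (((i : Int) - 1) ∈ ((sn : Int) :: rest)) ↔ ((i : Int) - 1) ∈ rest := by
        simp only [List.mem_cons, or_iff_right_iff_imp]
        intro h; omega
      simp only [m1, m2]
      by_cases hm : (i : Int) ∈ rest
      · have hge := hrest _ hm
        rw [if_pos hm, if_pos hm, getD_swap _ _ _ _ h1, if_neg (by omega), if_neg (by omega)]
      · by_cases hm2 : ((i : Int) - 1) ∈ rest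
        · have hge := hrest _ hm2
          rw [if_neg hm, if_pos hm2, if_neg hm, if_pos hm2,
            getD_swap _ _ _ _ h1, if_neg (by omega), if_neg (by omega)]
        · rw [if_neg hm, if_neg hm2, if_neg hm, if_neg hm2,
            getD_swap _ _ _ _ h1, if_neg (by omega), if_neg (by omega)]

lemma self_eq_map_range (l : List Int) :
    (List.range l.length).map (fun i => l.getD i 0) = l := by
  apply List.ext_getElem
  · simp
  · intro i h1 h2
    simp [List.getD_eq_getElem?_getD, List.getElem?_eq_getElem h2]

lemma A_copy (ss line : List Int) :
    ∀ (m j k : Nat) (acc : List Int),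
      (∀ i : Nat, j ≤ i → i < j + m → k < ss.length →
        (i : Int) ≠ ss.getD k 0 ∧ (i : Int) ≠ ss.getD k 0 + 1) →
      (List.range' j m).foldl (stepA ss line) (k, acc)
        = (k, acc ++ (List.range' j m).map (fun (i : Nat) => PySem.List.pyGetD line (i : Int) 0)) := by
  intro m
  induction m with
  | zero => intro j k acc h; simp
  | succ m ih =>
    intro j k acc h
    rw [List.range'_succ]
    simp only [List.foldl_cons, List.map_cons]
    have hstep : stepA ss line (k, acc) j = (k, acc ++ [PySem.List.pyGetD line (j : Int) 0]) := by
      have hj := h j le_rfl (by omega)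
      unfold stepA
      simp only [PySem.List.pyGetD_natCast]
      split_ifs with h1 h2
      · exact absurd h1.2 (hj h1.1).1
      · exact absurd h2.2 (hj h2.1).2
      · rfl
    rw [hstep, ih (j+1) k _ (fun i hi1 hi2 hk => h i (by omega) (by omega) hk)]
    simp

lemma A_seg (line ss : List Int) (hg : Gapped ss) (hb : Bounded ss line.length) :
    ∀ (tl : List Int) (k j : Nat) (acc : List Int),
      ss.drop k = tl →
      (∀ s ∈ ss.take k, s + 2 ≤ (j : Int)) →
      (∀ s ∈ tl, (j : Int) ≤ s) →
      j ≤ line.length →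
      (List.range' j (line.length - j)).foldl (stepA ss line) (k, acc)
        = (k + tl.length, acc ++ (List.range' j (line.length - j)).map (tgt line ss)) := by
  intro tl
  induction tl with
  | nil =>
    intro k j acc hdrop htake _ hj
    have hk : ss.length ≤ k := List.drop_eq_nil_iff.mp hdrop
    have htakeall : ∀ s ∈ ss, s + 2 ≤ (j : Int) := by
      intro s hs; exact htake s (by rwa [List.take_of_length_le hk])
    rw [A_copy ss line _ j k acc (fun i _ _ hk' => absurd hk' (by omega))]
    simp only [List.length_nil, Nat.add_zero]
    congr 1
    congr 1
    apply List.map_congr_left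
    intro i hi
    obtain ⟨hi1, hi2⟩ := List.mem_range'_1.mp hi
    have h1 : ((i : Int)) ∉ ss := fun h => by have := htakeall _ h; omega
    have h2 : ((i : Int) - 1) ∉ ss := fun h => by have := htakeall _ h; omega
    simp [tgt, h1, h2]
  | cons s rest ihtl =>
    intro k j acc hdrop htake htl hj
    have hmem : s ∈ ss := List.mem_of_mem_drop (hdrop ▸ List.mem_cons_self)
    have hsb := hb s hmem
    obtain ⟨sn, rfl⟩ : ∃ sn : Nat, s = (sn : Int) := ⟨s.toNat, (Int.toNat_of_nonneg hsb.1).symm⟩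
    have h1 : sn + 1 < line.length := by have := hsb.2; omega
    have hjs : j ≤ sn := by have := htl _ List.mem_cons_self; omega
    have hk : k < ss.length := by
      have := List.drop_eq_nil_iff (l := ss) (i := k)
      rw [hdrop] at this; by_contra hc; simp at this; omega
    have hgetk : ss[k]? = some ((sn : Int)) := by
      have h' : (ss.drop k)[0]? = some ((sn : Int)) := by rw [hdrop]; rfl
      rw [List.getElem?_drop] at h'; simpa using h'
    have hget : ss.getD k 0 = (sn : Int) := by simp [List.getD_eq_getElem?_getD, hgetk]
    have hrest : ∀ r ∈ rest, (sn : Int) + 2 ≤ r := by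
      have hsub := hg.sublist (List.drop_sublist k ss)
      rw [hdrop] at hsub
      exact (List.pairwise_cons.mp hsub).1
    have hchar : ∀ x ∈ ss, x + 2 ≤ (j : Int) ∨ x = (sn : Int) ∨ (sn : Int) + 2 ≤ x := by
      intro x hx
      have hx' : x ∈ ss.take k ++ ss.drop k := by rw [List.take_append_drop]; exact hx
      rcases List.mem_append.mp hx' with h | h
      · exact Or.inl (htake _ h)
      · rw [hdrop] at h
        rcases List.mem_cons.mp h with h | h
        · exact Or.inr (Or.inl h)
        · exact Or.inr (Or.inr (hrest _ h))
    -- split the range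
    have hsplit : line.length - j = (sn - j) + (2 + (line.length - (sn + 2))) := by omega
    rw [hsplit, ← List.range'_append, ← List.range'_append]
    simp only [Nat.one_mul, show j + (sn - j) = sn from by omega]
    rw [List.foldl_append, List.foldl_append]
    -- first segment: plain copy
    rw [A_copy ss line (sn - j) j k acc
      (fun i hi1 hi2 _ => by rw [hget]; constructor <;> omega)]
    -- middle segment [sn, sn+1]
    have st1 : ∀ acc1 : List Int, stepA ss line (k, acc1) sn
        = (k, acc1 ++ [PySem.List.pyGetD line ((sn : Int) + 1) 0]) := by
      intro acc1
      unfold stepA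
      simp only [PySem.List.pyGetD_natCast, hget]
      rw [if_pos ⟨hk, trivial⟩]
    have st2 : ∀ acc2 : List Int, stepA ss line (k, acc2) (sn + 1)
        = (k + 1, acc2 ++ [PySem.List.pyGetD line (sn : Int) 0]) := by
      intro acc2
      unfold stepA
      simp only [PySem.List.pyGetD_natCast, hget]
      rw [if_neg (by rintro ⟨-, h⟩; push_cast at h; omega), if_pos ⟨hk, by push_cast; ring⟩]
    have hmid : ∀ acc1 : List Int, (List.range' sn 2).foldl (stepA ss line) (k, acc1)
        = (k + 1, acc1 ++ [PySem.List.pyGetD line ((sn : Int) + 1) 0, PySem.List.pyGetD line (sn : Int) 0]) := by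
      intro acc1
      show (List.foldl (stepA ss line) _ [sn, sn + 1]) = _
      simp only [List.foldl_cons, List.foldl_nil, st1, st2, List.append_assoc]
      rfl
    rw [hmid]
    -- last segment: recursive call
    have hdrop' : ss.drop (k + 1) = rest := by
      have h := congrArg (List.drop 1) hdrop
      simpa [List.drop_drop] using h
    have htake' : ∀ x ∈ ss.take (k + 1), x + 2 ≤ ((sn + 2 : Nat) : Int) := by
      intro x hx
      rw [List.take_succ] at hx
      rcases List.mem_append.mp hx with h | h
      · have := htake _ h; push_cast; omega
      · rw [hgetk] at h; simp at h; push_cast; omega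
    have htl' : ∀ r ∈ rest, ((sn + 2 : Nat) : Int) ≤ r := by
      intro r hr; have := hrest _ hr; push_cast; omega
    have hrec := fun acc' => ihtl (k + 1) (sn + 2) acc' hdrop' htake' htl' (by omega)
    rw [hrec _]
    -- assemble
    rw [Prod.mk.injEq]
    constructor
    · simp; omega
    · have e1 : (List.range' j (sn - j)).map (fun (i : Nat) => PySem.List.pyGetD line (i : Int) 0)
          = (List.range' j (sn - j)).map (tgt line ss) := by
        apply List.map_congr_left
        intro i hi
        obtain ⟨hi1, hi2⟩ := List.mem_range'_1.mp hi
        have hm1 : ((i : Int)) ∉ ss := fun h => by rcases hchar _ h with h | h | h <;> omega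
        have hm2 : ((i : Int) - 1) ∉ ss := fun h => by rcases hchar _ h with h | h | h <;> omega
        simp [tgt, hm1, hm2]
      have hv1 : tgt line ss sn = PySem.List.pyGetD line ((sn : Int) + 1) 0 := by
        have hc : ((sn : Int) + 1) = ((sn + 1 : Nat) : Int) := by push_cast; ring
        rw [hc, PySem.List.pyGetD_natCast]
        simp [tgt, hmem]
      have hv2 : tgt line ss (sn + 1) = PySem.List.pyGetD line ((sn : Int)) 0 := by
        have hm1 : ((sn : Int) + 1) ∉ ss := fun h => by
          rcases hchar _ h with h | h | h <;> omega
        rw [PySem.List.pyGetD_natCast]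
        simp [tgt, hm1, hmem]
      have e2 : (List.range' sn 2).map (tgt line ss)
          = [PySem.List.pyGetD line ((sn : Int) + 1) 0, PySem.List.pyGetD line ((sn : Int)) 0] := by
        rw [show List.range' sn 2 = [sn, sn + 1] from rfl]
        simp [hv1, hv2]
      simp only [List.map_append, ← e1, e2, List.append_assoc]

lemma B_fold (ss : List Int) :
    ∀ (line : List Int), Gapped ss → Bounded ss line.length →
      ss.foldl stepB line = (List.range line.length).map (tgt line ss) := by
  induction ss with
  | nil =>
    intro line _ _
    simp only [List.foldl_nil]
    have h : (List.range line.length).map (tgt line []) = (List.range line.length).map (fun i => line.getD i 0) := by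
      apply List.map_congr_left; intro i _; simp [tgt]
    rw [h, self_eq_map_range]
  | cons s rest ih =>
    intro line hg hb
    have hs := hb s List.mem_cons_self
    obtain ⟨sn, rfl⟩ : ∃ sn : Nat, s = (sn : Int) := ⟨s.toNat, (Int.toNat_of_nonneg hs.1).symm⟩
    have h1 : sn + 1 < line.length := by have := hs.2; omega
    have hrest : ∀ r ∈ rest, (sn : Int) + 2 ≤ r := fun r hr => (List.pairwise_cons.mp hg).1 r hr
    have hlen : (stepB line (sn : Int)).length = line.length := by rw [stepB_eq]; simp
    simp only [List.foldl_cons]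
    rw [ih (stepB line (sn : Int)) (List.pairwise_cons.mp hg).2
      (by rw [hlen]; exact fun r hr => hb r (List.mem_cons_of_mem _ hr)), hlen]
    apply List.map_congr_left
    intro i _
    exact tgt_swap line sn rest h1 hrest i

lemma pre_props (line swaps : List Int) (h : Pre_apply_swaps line swaps) :
    Gapped (PySem.List.sorted swaps (fun x => x) false)
      ∧ Bounded (PySem.List.sorted swaps (fun x => x) false) line.length := by
  have hperm : (PySem.List.sorted swaps (fun x => x) false).Perm swaps := PySem.List.sorted_perm _ _ _
  constructor
  · have hpair : (PySem.List.sorted swaps (fun x => x) false).Pairwise (fun a b => a ≤ b) := by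
      have := PySem.List.sorted_pairwise (xs := swaps) (key := fun x => x)
      simpa using this
    have hnd : (PySem.List.sorted swaps (fun x => x) false).Nodup := hperm.symm.nodup h.1
    refine (hpair.and hnd).imp_of_mem ?_
    intro a b ha hb hab
    have ha' : a ∈ swaps := hperm.mem_iff.mp ha
    have hb' : b ∈ swaps := hperm.mem_iff.mp hb
    have hna := (h.2 a ha').2.1
    have : b ≠ a + 1 := fun hc => hna (hc ▸ hb')
    omega
  · intro s hs
    have := h.2 s (hperm.mem_iff.mp hs)
    exact ⟨this.2.2.1, by omega⟩

-- ===== VERDICT (by name: the statement is the Claim_ definition above) =====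
theorem apply_swaps_spec : Claim_equal_apply_swaps := by
  intro line swaps _ hpre
  unfold Spec_apply_swaps
  simp only [apply_swaps, apply_swaps_alt]
  obtain ⟨hg, hb⟩ := pre_props line swaps hpre
  have hA := A_seg line (PySem.List.sorted swaps (fun x => x) false) hg hb
    (PySem.List.sorted swaps (fun x => x) false) 0 0 []
    (by simp) (by simp) (fun s hs => by simpa using (hb s hs).1) (Nat.zero_le _)
  simp only [Nat.sub_zero] at hA
  rw [B_fold _ line hg hb, List.range_eq_range', hA]
  simp
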